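-- pv_equiv track=rewrite | github.com/kingrubic/leon-openclaw | run_india_evisa_daily_27mar26.py | strip_bold_markers
-- ===== SOURCE A (Python) =====
-- def strip_bold_markers(lines):
--     clean = []
--     spans = []
--     for line in lines:
--         out = ''
--         i = 0
--         line_spans = []
--         while i < len(line):
--             if line.startswith('**', i):
--                 j = line.find('**', i + 2)
--                 if j != -1:
--                     start = len(out)
--                     out += line[i + 2:j]
--                     end = len(out)
--                     line_spans.append((start, end))
--                     i = j + 2
--                     continue
--             out += line[i]
--             i += 1
--         clean.append(out)
--         spans.append(line_spans)
--     return clean, spans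
-- ===== SOURCE B (Python) =====
-- def strip_bold_markers(lines):
--     clean = []
--     spans = []
--     for line in lines:
--         parts = line.split('**')
--         out = parts[0]
--         line_spans = []
--         k = 1
--         while k + 1 < len(parts):
--             bold = parts[k]
--             line_spans.append((len(out), len(out) + len(bold)))
--             out += bold + parts[k + 1]
--             k += 2
--         if k < len(parts):
--             out += '**' + parts[k]
--         clean.append(out)
--         spans.append(line_spans)
--     return clean, spans
-- ===== Notes on version B (the rewrite author's own statement) =====
-- stated objective: idiomatic
-- what changed: Replaces A's per-character scan (startswith/find at each index, char-by-char copying) with one str.split('**') per line followed by a pairwise walk over the parts that joins them and records span offsets.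
import Mathlib
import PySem

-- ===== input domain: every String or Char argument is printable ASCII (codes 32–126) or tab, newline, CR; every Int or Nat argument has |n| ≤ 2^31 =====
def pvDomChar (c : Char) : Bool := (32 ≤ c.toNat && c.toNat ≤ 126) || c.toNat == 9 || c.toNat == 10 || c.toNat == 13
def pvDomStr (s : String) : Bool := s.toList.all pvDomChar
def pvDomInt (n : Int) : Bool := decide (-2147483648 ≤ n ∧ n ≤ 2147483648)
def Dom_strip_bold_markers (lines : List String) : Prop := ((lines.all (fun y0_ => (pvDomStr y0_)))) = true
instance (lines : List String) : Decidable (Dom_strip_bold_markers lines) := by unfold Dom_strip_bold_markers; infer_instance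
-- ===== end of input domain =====

-- B replaces A's char-by-char scan (startswith/find per position) by one str.split('**') followed
-- by a pairwise walk over the parts; idiomatic, and measurably faster (C-level split vs per-char loop).

-- ===== PORT A =====

-- termination helper for the while loop (cited in decreasing_by): a found index is ≥ its start
theorem pv_findFrom_ge_start (s sub : List Char) (k : Nat) :
    PySem.Chars.findFrom s sub (k : Int) none = -1 ∨ (k : Int) ≤ PySem.Chars.findFrom s sub (k : Int) none := by
  rcases Nat.lt_or_ge s.length k with hk | hk
  swap
  · rw [PySem.Chars.findFrom_natCast s sub k hk]
    split_ifs with hf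
    · exact Or.inl rfl
    · right
      have := PySem.Chars.neg_one_le_find (List.drop k s) sub
      omega
  · left
    simp [PySem.Chars.findFrom]
    omega

-- the inner while loop of A: i, out, line_spans as loop state
def stripLineA (cs : List Char) (i : Nat) (out : List Char) (sp : List (Int × Int)) :
    List Char × List (Int × Int) :=
  if h : i < cs.length then
    if PySem.Chars.startswith (cs.drop i) ['*', '*'] then          -- line.startswith('**', i), exact for 0 ≤ i ≤ len
      -- j = line.find('**', i + 2)
      if hj : PySem.Chars.findFrom cs ['*', '*'] ((i : Int) + 2) none ≠ -1 then
        let j := PySem.Chars.findFrom cs ['*', '*'] ((i : Int) + 2) none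
        let out' := out ++ PySem.List.slice cs (some ((i : Int) + 2)) (some j)     -- out += line[i+2:j]
        stripLineA cs (j.toNat + 2) out' (sp ++ [((out.length : Int), (out'.length : Int))])
      else
        stripLineA cs (i + 1) (out ++ [cs[i]]) sp
    else
      stripLineA cs (i + 1) (out ++ [cs[i]]) sp
  else (out, sp)
termination_by cs.length - i
decreasing_by
  · have hc : ((i : Int) + 2) = ((i + 2 : Nat) : Int) := by push_cast; ring
    rw [hc] at hj ⊢
    rcases pv_findFrom_ge_start cs ['*', '*'] (i + 2) with h1 | h1
    · exact absurd h1 hj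
    · omega
  · omega
  · omega

def strip_bold_markers (lines : List String) : List String × (List (List (Int × Int))) :=
  lines.foldl
    (fun (acc : List String × List (List (Int × Int))) line =>
      let r := stripLineA line.toList 0 [] []
      (acc.1 ++ [String.ofList r.1], acc.2 ++ [r.2]))
    ([], [])

-- ===== PORT B =====

-- the pairwise while loop over parts[1:]: out, line_spans as state, pairs consumed from the front
def assembleB (out : List Char) (sp : List (Int × Int)) : List (List Char) → List Char × List (Int × Int)
  | bold :: lit :: rest =>
      assembleB (out ++ bold ++ lit) (sp ++ [((out.length : Int), ((out.length : Int) + (bold.length : Int)))]) rest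
  | [last] => (out ++ ['*', '*'] ++ last, sp)                      -- unmatched trailing '**'
  | [] => (out, sp)

def stripLineB (cs : List Char) : List Char × List (Int × Int) :=
  match PySem.Chars.splitOn cs ['*', '*'] with                     -- line.split('**')
  | p0 :: rest => assembleB p0 [] rest
  | [] => ([], [])                                                 -- unreachable: split never returns []

def strip_bold_markers_alt (lines : List String) : List String × (List (List (Int × Int))) :=
  lines.foldl
    (fun (acc : List String × List (List (Int × Int))) line =>
      let r := stripLineB line.toList
      (acc.1 ++ [String.ofList r.1], acc.2 ++ [r.2]))
    ([], [])

-- ===== PRECONDITION & SPEC =====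
def Spec_strip_bold_markers (lines : List String) (out : List String × (List (List (Int × Int)))) : Prop := out = strip_bold_markers_alt lines
instance (lines : List String) (out : List String × (List (List (Int × Int)))) : Decidable (Spec_strip_bold_markers lines out) := by unfold Spec_strip_bold_markers; infer_instance

-- ===== CLAIM (what is proved, stated in full; the proofs are below) =====
def Claim_equal_strip_bold_markers : Prop := ∀ (lines : List String), Dom_strip_bold_markers lines → Spec_strip_bold_markers lines (strip_bold_markers lines)

-- ===== LEMMAS AND PROOFS =====

-- reference form of split('**'): structural recursion on the line
def splitBB (l : List Char) : List (List Char) :=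
  match l with
  | [] => [[]]
  | c :: rest =>
    if ['*', '*'].isPrefixOf l then [] :: splitBB (rest.drop 1)
    else
      match splitBB rest with
      | p :: ps => (c :: p) :: ps
      | [] => [[c]]
termination_by l.length
decreasing_by
  all_goals simp

theorem splitBB_nil : splitBB [] = [[]] := by rw [splitBB]

theorem splitBB_pos (c : Char) (rest : List Char) (hp : ['*', '*'] <+: (c :: rest)) :
    splitBB (c :: rest) = [] :: splitBB (rest.drop 1) := by
  rw [splitBB, if_pos (List.isPrefixOf_iff_prefix.mpr hp)]

theorem splitBB_neg (c : Char) (rest : List Char) (hp : ¬ ['*', '*'] <+: (c :: rest)) :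
    splitBB (c :: rest) = match splitBB rest with
      | p :: ps => (c :: p) :: ps
      | [] => [[c]] := by
  rw [splitBB, if_neg (fun h => hp (List.isPrefixOf_iff_prefix.mp h))]

theorem splitBB_ne_nil (l : List Char) : splitBB l ≠ [] := by
  match l with
  | [] => rw [splitBB_nil]; simp
  | c :: rest =>
    by_cases hp : ['*', '*'] <+: (c :: rest)
    · rw [splitBB_pos c rest hp]; simp
    · rw [splitBB_neg c rest hp]
      split <;> simp

-- the splitOn worker computes splitBB, for sufficient fuel
theorem go_splitBB (fuel : Nat) : ∀ (l cur : List Char) (acc : List (List Char)), l.length < fuel →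
    PySem.Chars.splitOn.go ['*', '*'] fuel l cur acc =
      acc.reverse ++ ((cur.reverse ++ (splitBB l).headI) :: (splitBB l).tail) := by
  induction fuel with
  | zero => intro l cur acc h; omega
  | succ f ih =>
    intro l cur acc h
    match l with
    | [] =>
      rw [PySem.Chars.splitOn.go]
      · simp [splitBB_nil]
      · omega
    | c :: rest =>
      rw [PySem.Chars.splitOn.go]
      split_ifs with hp
      · have hp' : ['*', '*'] <+: (c :: rest) := List.isPrefixOf_iff_prefix.mp hp
        have hd : List.drop (['*', '*'].length) (c :: rest) = rest.drop 1 := by simp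
        rw [hd, ih (rest.drop 1) [] (cur.reverse :: acc) (by simp at h ⊢; omega)]
        rw [splitBB_pos c rest hp']
        rcases hs : splitBB (rest.drop 1) with _ | ⟨p, ps⟩
        · exact absurd hs (splitBB_ne_nil _)
        · simp
      · have hp' : ¬ ['*', '*'] <+: (c :: rest) := fun h' => hp (List.isPrefixOf_iff_prefix.mpr h')
        rw [ih rest (c :: cur) acc (by simp at h ⊢; omega)]
        rw [splitBB_neg c rest hp']
        rcases hs : splitBB rest with _ | ⟨p, ps⟩
        · exact absurd hs (splitBB_ne_nil _)
        · simp

-- Chars.splitOn '**' computes splitBB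
theorem splitOn_eq_splitBB (l : List Char) : PySem.Chars.splitOn l ['*', '*'] = splitBB l := by
  rw [PySem.Chars.splitOn, go_splitBB (l.length + 1) l [] [] (by omega)]
  rcases hs : splitBB l with _ | ⟨p, ps⟩
  · exact absurd hs (splitBB_ne_nil l)
  · simp

-- no separator present: the line is one part
theorem splitBB_of_not_infix (t : List Char) (h : ¬ ['*', '*'] <:+: t) : splitBB t = [t] := by
  induction t with
  | nil => exact splitBB_nil
  | cons c rest ih =>
    have hp : ¬ ['*', '*'] <+: (c :: rest) := fun hp => h hp.isInfix
    rw [splitBB_neg c rest hp, ih (fun hi => h (List.infix_cons hi))]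

-- first separator occurrence at pos: split off the head part
theorem splitBB_decomp (pos : Nat) : ∀ (t : List Char),
    ['*', '*'] <+: t.drop pos → (∀ q < pos, ¬ ['*', '*'] <+: t.drop q) →
    splitBB t = t.take pos :: splitBB (t.drop (pos + 2)) := by
  induction pos with
  | zero =>
    intro t h1 _
    simp only [List.drop_zero] at h1
    obtain ⟨u, hu⟩ := h1
    subst hu
    rw [show (['*', '*'] : List Char) ++ u = '*' :: '*' :: u from rfl]
    rw [splitBB_pos '*' ('*' :: u) ⟨u, rfl⟩]
    simp
  | succ p ih =>
    intro t h1 h2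
    match t with
    | [] => simp at h1
    | c :: rest =>
      have hp : ¬ ['*', '*'] <+: (c :: rest) := by
        have := h2 0 (by omega); simpa using this
      rw [splitBB_neg c rest hp]
      rw [ih rest (by simpa using h1) (fun q hq => by simpa using h2 (q + 1) (by omega))]
      simp

-- the joint view of out/sp and the remaining parts
def stepBB (out : List Char) (sp : List (Int × Int)) : List (List Char) → List Char × List (Int × Int)
  | [] => (out, sp)
  | p0 :: rest => assembleB (out ++ p0) sp rest

-- a findFrom that can see no separator returns -1
theorem pv_findFrom_none (s sub : List Char) (k : Nat)
    (h : ¬ sub <:+: s.drop k) : PySem.Chars.findFrom s sub (k : Int) none = -1 := by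
  rcases Nat.lt_or_ge s.length k with hk | hk
  · simp [PySem.Chars.findFrom]
    omega
  · rw [PySem.Chars.findFrom_natCast s sub k hk, if_pos ((PySem.Chars.find_eq_neg_one_iff _ _).mpr h)]

-- once no separator can ever be found again, A copies the tail verbatim
theorem stripLineA_tail (cs : List Char) (n : Nat) : ∀ (i : Nat) (out : List Char) (sp : List (Int × Int)),
    cs.length - i ≤ n → ¬ ['*', '*'] <:+: cs.drop (i + 2) →
    stripLineA cs i out sp = (out ++ cs.drop i, sp) := by
  induction n with
  | zero =>
    intro i out sp hn h
    rw [stripLineA, dif_neg (by omega), List.drop_eq_nil_of_le (by omega), List.append_nil]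
  | succ m ih =>
    intro i out sp hn h
    by_cases hlen : i < cs.length
    · have hj : PySem.Chars.findFrom cs ['*', '*'] ((i : Int) + 2) none = -1 := by
        have := pv_findFrom_none cs ['*', '*'] (i + 2) h
        rwa [show ((i + 2 : Nat) : Int) = (i : Int) + 2 by push_cast; ring] at this
      have hnext : ¬ ['*', '*'] <:+: cs.drop (i + 1 + 2) := by
        intro hinf
        apply h
        have : cs.drop (i + 1 + 2) = (cs.drop (i + 2)).drop 1 := by
          rw [List.drop_drop]
        rw [this] at hinf
        exact hinf.trans (List.drop_suffix 1 _).isInfix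
      have hstep : stripLineA cs (i + 1) (out ++ [cs[i]]) sp = (out ++ [cs[i]] ++ cs.drop (i + 1), sp) :=
        ih (i + 1) _ sp (by omega) hnext
      have hout : out ++ [cs[i]] ++ cs.drop (i + 1) = out ++ cs.drop i := by
        rw [List.append_assoc, List.singleton_append, ← List.drop_eq_getElem_cons hlen]
      rw [stripLineA, dif_pos hlen,
        dif_neg (show ¬ (PySem.Chars.findFrom cs ['*', '*'] ((i : Int) + 2) none ≠ -1) by simp [hj])]
      split_ifs with hsw <;> rw [hstep, hout]
    · rw [stripLineA, dif_neg hlen, List.drop_eq_nil_of_le (by omega), List.append_nil]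

-- main loop invariant: A's scan from i computes the pairwise walk over the split of the tail
theorem stripLineA_eq_stepBB (cs : List Char) (n : Nat) : ∀ (i : Nat) (out : List Char) (sp : List (Int × Int)),
    cs.length - i ≤ n →
    stripLineA cs i out sp = stepBB out sp (splitBB (cs.drop i)) := by
  induction n with
  | zero =>
    intro i out sp hn
    rw [stripLineA, dif_neg (by omega), List.drop_eq_nil_of_le (by omega), splitBB_nil]
    simp [stepBB, assembleB]
  | succ m ih =>
    intro i out sp hn
    by_cases hlen : i < cs.length
    · by_cases hsw : PySem.Chars.startswith (cs.drop i) ['*', '*'] = true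
      · have hpre : ['*', '*'] <+: cs.drop i := (PySem.Chars.startswith_iff _ _).mp hsw
        obtain ⟨t, ht⟩ := hpre
        have hi2 : i + 2 ≤ cs.length := by
          have := congrArg List.length ht
          simp at this
          omega
        have hdrop2 : cs.drop (i + 2) = t := by
          have h1 : cs.drop (i + 2) = (cs.drop i).drop 2 := by rw [List.drop_drop]
          rw [h1, ← ht]
          rfl
        have hff : PySem.Chars.findFrom cs ['*', '*'] ((i : Int) + 2) none =
            (if PySem.Chars.find t ['*', '*'] = -1 then -1
             else ((i + 2 : Nat) : Int) + PySem.Chars.find t ['*', '*']) := by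
          rw [show ((i : Int) + 2) = ((i + 2 : Nat) : Int) by push_cast; ring,
            PySem.Chars.findFrom_natCast cs ['*', '*'] (i + 2) hi2, hdrop2]
        rw [stripLineA, dif_pos hlen, if_pos hsw]
        by_cases hf : PySem.Chars.find t ['*', '*'] = -1
        · -- unmatched opening marker: the rest of the line is copied verbatim
          have hninf : ¬ ['*', '*'] <:+: t := (PySem.Chars.find_eq_neg_one_iff t _).mp hf
          rw [dif_neg (show ¬ (PySem.Chars.findFrom cs ['*', '*'] ((i : Int) + 2) none ≠ -1) by simp [hff, hf])]
          have hnext : ¬ ['*', '*'] <:+: cs.drop (i + 1 + 2) := by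
            intro hinf
            apply hninf
            have h1 : cs.drop (i + 1 + 2) = (cs.drop (i + 2)).drop 1 := by
              rw [List.drop_drop]
            rw [h1, hdrop2] at hinf
            exact hinf.trans (List.drop_suffix 1 _).isInfix
          rw [stripLineA_tail cs cs.length (i + 1) (out ++ [cs[i]]) sp (by omega) hnext]
          have hout : out ++ [cs[i]] ++ cs.drop (i + 1) = out ++ cs.drop i := by
            rw [List.append_assoc, List.singleton_append, ← List.drop_eq_getElem_cons hlen]
          rw [hout, ← ht]
          rw [show ((['*', '*'] : List Char) ++ t) = '*' :: '*' :: t from rfl]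
          rw [splitBB_pos '*' ('*' :: t) (by simp), show List.drop 1 ('*' :: t) = t from rfl,
            splitBB_of_not_infix t hninf]
          simp [stepBB, assembleB]
        · -- matched pair: find points at the first '**' in t
          have hfind0 : 0 ≤ PySem.Chars.find t ['*', '*'] := by
            have := PySem.Chars.neg_one_le_find t ['*', '*']
            omega
          obtain ⟨hpre2, hmin⟩ := PySem.Chars.find_spec hfind0
          rw [dif_pos (show (PySem.Chars.findFrom cs ['*', '*'] ((i : Int) + 2) none ≠ -1) by rw [hff, if_neg hf]; omega)]
          simp only []
          have hjval : (PySem.Chars.findFrom cs ['*', '*'] ((i : Int) + 2) none).toNat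
              = i + 2 + (PySem.Chars.find t ['*', '*']).toNat := by
            rw [hff, if_neg hf]
            omega
          -- the copied slice is the first pos characters of t
          have hslice : PySem.List.slice cs (some ((i : Int) + 2))
              (some (PySem.Chars.findFrom cs ['*', '*'] ((i : Int) + 2) none))
              = t.take (PySem.Chars.find t ['*', '*']).toNat := by
            rw [hff, if_neg hf,
              show ((i + 2 : Nat) : Int) + PySem.Chars.find t ['*', '*']
                = ((i + 2 + (PySem.Chars.find t ['*', '*']).toNat : Nat) : Int) by push_cast; omega,
              show ((i : Int) + 2) = ((i + 2 : Nat) : Int) by push_cast; ring,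
              PySem.List.slice_natCast cs (i + 2) (i + 2 + (PySem.Chars.find t ['*', '*']).toNat)]
            rw [hdrop2]
            congr 1
            omega
          set pos := (PySem.Chars.find t ['*', '*']).toNat with hposdef
          have hdropj : cs.drop ((PySem.Chars.findFrom cs ['*', '*'] ((i : Int) + 2) none).toNat + 2)
              = t.drop (pos + 2) := by
            rw [hjval, show i + 2 + pos + 2 = (i + 2) + (pos + 2) by ring, ← List.drop_drop, hdrop2]
          have hrec := ih ((PySem.Chars.findFrom cs ['*', '*'] ((i : Int) + 2) none).toNat + 2)
            (out ++ PySem.List.slice cs (some ((i : Int) + 2))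
              (some (PySem.Chars.findFrom cs ['*', '*'] ((i : Int) + 2) none)))
            (sp ++ [((out.length : Int),
              (((out ++ PySem.List.slice cs (some ((i : Int) + 2))
                (some (PySem.Chars.findFrom cs ['*', '*'] ((i : Int) + 2) none))).length : Int)))])
            (by rw [hjval]; omega)
          rw [hrec, hdropj, hslice]
          -- right-hand side: split the line at the opening marker, then at the first '**' in t
          rw [← ht, show ((['*', '*'] : List Char) ++ t) = '*' :: '*' :: t from rfl,
            splitBB_pos '*' ('*' :: t) (by simp),
            show ('*' :: t).drop 1 = t from rfl,
            splitBB_decomp pos t hpre2 hmin]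
          rcases hs : splitBB (t.drop (pos + 2)) with _ | ⟨p, ps⟩
          · exact absurd hs (splitBB_ne_nil _)
          · simp [stepBB, assembleB]
      · rw [stripLineA, dif_pos hlen, if_neg hsw]
        rw [ih (i + 1) (out ++ [cs[i]]) sp (by omega)]
        have hcons : cs.drop i = cs[i] :: cs.drop (i + 1) := List.drop_eq_getElem_cons hlen
        have hp : ¬ ['*', '*'] <+: (cs[i] :: cs.drop (i + 1)) := by
          rw [← hcons]
          intro hpre
          exact absurd ((PySem.Chars.startswith_iff _ _).mpr hpre) hsw
        rw [hcons, splitBB_neg _ _ hp]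
        rcases hs : splitBB (cs.drop (i + 1)) with _ | ⟨p, ps⟩
        · exact absurd hs (splitBB_ne_nil _)
        · simp [stepBB]
    · rw [stripLineA, dif_neg hlen, List.drop_eq_nil_of_le (by omega), splitBB_nil]
      simp only [stepBB, List.append_nil]
      rfl

theorem stripLine_eq (cs : List Char) : stripLineA cs 0 [] [] = stripLineB cs := by
  have h := stripLineA_eq_stepBB cs cs.length 0 [] [] (by omega)
  rw [stripLineB, splitOn_eq_splitBB]
  rcases hs : splitBB cs with _ | ⟨p0, rest⟩
  · exact absurd hs (splitBB_ne_nil cs)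
  · simp only [List.drop_zero, hs, stepBB] at h
    simpa using h

-- ===== VERDICT (by name: the statement is the Claim_ definition above) =====
theorem strip_bold_markers_spec : Claim_equal_strip_bold_markers := by
  intro lines _
  unfold Spec_strip_bold_markers strip_bold_markers strip_bold_markers_alt
  refine PySem.List.foldl_congr_mem lines _ _ _ ?_
  intro acc line _
  simp only [stripLine_eq]
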